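-- pv_equiv track=rewrite | github.com/Santiago-Czop/MYO_TP1 | main_bronk.py | get_clothes_by_time
-- ===== SOURCE A (Python) =====
-- def get_clothes_by_time(times_dict):
--     clothes_by_time = dict()
--
--     times_dict_copy = dict(times_dict)
--     while times_dict_copy:
--         slowest_time = max(times_dict_copy.values())
--         clothes_by_time[slowest_time] = [k for k,v in times_dict_copy.items() if v == slowest_time]
--         for k in clothes_by_time[slowest_time]:
--             del times_dict_copy[k]
--     return clothes_by_time
-- ===== SOURCE B (Python) =====
-- def get_clothes_by_time(times_dict):
--     groups = {}
--     for k, v in dict(times_dict).items():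
--         groups.setdefault(v, []).append(k)
--     return {v: groups[v] for v in sorted(groups, reverse=True)}
-- ===== Notes on version B (the rewrite author's own statement) =====
-- stated objective: faster
-- what changed: Replaces the repeated extract-the-max-and-rescan while loop (one full scan of the remaining dict per distinct value) by a single grouping pass into a value-keyed dict followed by one descending sort of the distinct values.
import Mathlib
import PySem

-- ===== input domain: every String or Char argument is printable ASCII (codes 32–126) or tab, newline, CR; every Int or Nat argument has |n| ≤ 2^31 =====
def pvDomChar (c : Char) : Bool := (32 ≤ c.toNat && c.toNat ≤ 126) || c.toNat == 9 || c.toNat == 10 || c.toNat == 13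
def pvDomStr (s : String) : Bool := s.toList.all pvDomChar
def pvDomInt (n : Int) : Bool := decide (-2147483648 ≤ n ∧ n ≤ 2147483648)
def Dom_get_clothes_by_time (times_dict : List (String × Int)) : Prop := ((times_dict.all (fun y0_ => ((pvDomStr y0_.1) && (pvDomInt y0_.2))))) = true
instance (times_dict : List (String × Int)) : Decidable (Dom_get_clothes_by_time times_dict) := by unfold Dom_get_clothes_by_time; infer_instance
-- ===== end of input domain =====

-- B replaces A's repeated extract-the-maximum-and-rescan loop by one grouping pass into a
-- value-keyed dict plus one descending sort of the distinct values (objective: faster).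

-- ===== PORT A =====
-- the while loop: fuel = number of remaining items bounds the iterations (each pass deletes ≥ 1 key)
def pvAloop : Nat → PySem.Dict String Int → PySem.Dict Int (List String) → PySem.Dict Int (List String)
  | 0, _, res => res
  | fuel+1, copy, res =>
    if copy.size = 0 then res
    else
      match PySem.List.max? copy.values (fun v => v) with
      | none => res
      | some m =>
        -- [k for k, v in times_dict_copy.items() if v == slowest_time]
        let grp := (copy.items.filter (fun p => p.2 == m)).map (fun p => p.1)
        -- for k in clothes_by_time[slowest_time]: del times_dict_copy[k]
        pvAloop fuel (grp.foldl (fun d k => d.erase k) copy) (res.insert m grp)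

def get_clothes_by_time (times_dict : List (String × Int)) : List (Int × List String) :=
  let copy := PySem.Dict.ofList times_dict
  (pvAloop copy.size copy PySem.Dict.empty).items

-- ===== PORT B =====
def get_clothes_by_time_alt (times_dict : List (String × Int)) : List (Int × List String) :=
  -- groups.setdefault(v, []).append(k)  ==  groups[v] = groups.get(v, []) + [k]
  let groups := (PySem.Dict.ofList times_dict).items.foldl
      (fun g p => g.modify p.2 [] (fun l => l ++ [p.1])) PySem.Dict.empty
  (PySem.List.sorted groups.keys (fun v => v) true).map (fun v => (v, groups.getD v []))

-- ===== PRECONDITION & SPEC =====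
def Spec_get_clothes_by_time (times_dict : List (String × Int)) (out : List (Int × List String)) : Prop := out = get_clothes_by_time_alt times_dict
instance (times_dict : List (String × Int)) (out : List (Int × List String)) : Decidable (Spec_get_clothes_by_time times_dict out) := by unfold Spec_get_clothes_by_time; infer_instance

-- ===== CLAIM (what is proved, stated in full; the proofs are below) =====
def Claim_equal_get_clothes_by_time : Prop := ∀ (times_dict : List (String × Int)), Dom_get_clothes_by_time times_dict → Spec_get_clothes_by_time times_dict (get_clothes_by_time times_dict)

-- ===== LEMMAS AND PROOFS =====

-- deleting a list of keys filters the items list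
theorem pv_foldl_erase_items (ks : List String) (d : PySem.Dict String Int) :
    (ks.foldl (fun d k => d.erase k) d).items = d.items.filter (fun p => !(ks.contains p.1)) := by
  induction ks generalizing d with
  | nil => simp
  | cons k t ih =>
    simp only [List.foldl_cons, ih]
    cases d with | mk items =>
    simp only [PySem.Dict.erase, List.filter_filter]
    apply List.filter_congr; intro p _
    by_cases hk : p.1 = k <;> simp [hk]

-- a descending sort of a duplicate-free list is strictly decreasing
theorem pv_sorted_rev_pairwise_gt (xs : List Int) (h : xs.Nodup) :
    (PySem.List.sorted xs (fun x => x) true).Pairwise (fun a b => b < a) := by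
  have h1 := PySem.List.sorted_pairwise_rev (xs := xs) (key := fun v => v)
  have h2 : (PySem.List.sorted xs (fun x => x) true).Nodup :=
    (PySem.List.sorted_perm xs _ _).nodup_iff.mpr h
  exact (h1.and h2).imp (fun hp => lt_of_le_of_ne hp.1 hp.2.symm)

-- one iteration of A's loop: the head of the descending sort is the maximum
theorem pv_sorted_rev_cons_max (V : List Int) (m : Int) (hm : m ∈ V)
    (hmax : ∀ v ∈ V, v ≤ m) :
    PySem.List.sorted (PySem.Set.ofList V) (fun v => v) true
      = m :: PySem.List.sorted (PySem.Set.ofList (V.filter (fun v => !(v == m)))) (fun v => v) true := by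
  set V' := V.filter (fun v => !(v == m)) with hV'
  have hmemV' : ∀ x, x ∈ V' ↔ x ∈ V ∧ x ≠ m := by
    intro x; simp [hV', List.mem_filter]
  have hS'nd : (PySem.Set.ofList V' : List Int).Nodup := PySem.Set.nodup_ofList V'
  have hsortperm := PySem.List.sorted_perm (PySem.Set.ofList V') (fun v : Int => v) true
  have hmemS' : ∀ x, x ∈ PySem.List.sorted (PySem.Set.ofList V') (fun v => v) true ↔ x ∈ V ∧ x ≠ m := by
    intro x
    rw [hsortperm.mem_iff, PySem.Set.mem_ofList]
    exact hmemV' x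
  apply PySem.List.sorted_rev_eq_of_perm_of_pairwise_gt
  · apply (List.perm_ext_iff_of_nodup ?_ (PySem.Set.nodup_ofList V)).mpr
    · intro a
      rw [PySem.Set.mem_ofList]
      simp only [List.mem_cons, hmemS']
      constructor
      · rintro (rfl | ⟨hv, _⟩) <;> [exact hm; exact hv]
      · intro hv; by_cases ha : a = m
        · exact Or.inl ha
        · exact Or.inr ⟨hv, ha⟩
    · refine List.nodup_cons.mpr ⟨?_, hsortperm.nodup_iff.mpr hS'nd⟩
      intro hmem; exact ((hmemS' m).mp hmem).2 rfl
  · refine List.pairwise_cons.mpr ⟨?_, pv_sorted_rev_pairwise_gt _ hS'nd⟩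
    intro b hb
    obtain ⟨hbV, hbm⟩ := (hmemS' b).mp hb
    exact lt_of_le_of_ne (hmax b hbV) hbm

-- values and second components commute with filtering
theorem pv_filter_map_snd (L : List (String × Int)) (q : Int → Bool) :
    (L.filter (fun p => q p.2)).map (fun p => p.2) = (L.map (fun p => p.2)).filter q := by
  simp [List.filter_map]; rfl

-- A's loop, characterised: it appends the groups in descending value order
theorem pv_Aloop_spec (fuel : Nat) : ∀ (copy : PySem.Dict String Int) (res : PySem.Dict Int (List String)),
    copy.size ≤ fuel → copy.keys.Nodup → (∀ v ∈ copy.values, res.contains v = false) →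
    (pvAloop fuel copy res).items = res.items ++
      (PySem.List.sorted (PySem.Set.ofList copy.values) (fun v => v) true).map
        (fun v => (v, (copy.items.filter (fun p => p.2 == v)).map (fun p => p.1))) := by
  induction fuel with
  | zero =>
    intro copy res hsz hnd hres
    have hit : copy.items = [] := List.length_eq_zero_iff.mp (Nat.le_zero.mp hsz)
    simp [pvAloop, PySem.Dict.values, hit, PySem.List.sorted]
  | succ fuel ih =>
    intro copy res hsz hnd hres
    by_cases h0 : copy.size = 0
    · have hit : copy.items = [] := List.length_eq_zero_iff.mp h0
      simp [pvAloop, h0, PySem.Dict.values, hit, PySem.List.sorted]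
    · have hvne : copy.values ≠ [] := by
        intro h
        have hit : copy.items = [] := List.map_eq_nil_iff.mp h
        exact h0 (by simp [PySem.Dict.size, hit])
      cases hmx : PySem.List.max? copy.values (fun v => v) with
      | none => exact absurd ((PySem.List.max?_eq_none_iff _ _).mp hmx) hvne
      | some m =>
        have hm : m ∈ copy.values := PySem.List.max?_mem hmx
        have hmax : ∀ v ∈ copy.values, v ≤ m := PySem.List.max?_isMax hmx
        have hndL : (copy.items.map (fun p => p.1)).Nodup := hnd
        set L := copy.items with hL
        set grp := (L.filter (fun p => p.2 == m)).map (fun p => p.1) with hgrp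
        set copy' := grp.foldl (fun d k => d.erase k) copy with hcopy'
        have hit' : copy'.items = L.filter (fun p => !(p.2 == m)) := by
          rw [hcopy', pv_foldl_erase_items]
          apply List.filter_congr
          intro p hp
          by_cases hpm : p.2 = m
          · have : p.1 ∈ grp := by
              rw [hgrp]
              exact List.mem_map_of_mem (List.mem_filter.mpr ⟨hp, by simp [hpm]⟩)
            simp [this, hpm]
          · have : p.1 ∉ grp := by
              rw [hgrp]
              intro hmem
              obtain ⟨q, hq, hq1⟩ := List.mem_map.mp hmem
              obtain ⟨hqL, hq2⟩ := List.mem_filter.mp hq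
              have : q = p := List.inj_on_of_nodup_map hndL hqL hp hq1
              exact hpm (by simpa [this] using hq2)
            simp [this, hpm]
        have hval' : copy'.values = copy.values.filter (fun v => !(v == m)) := by
          show copy'.items.map (fun p => p.2) = _
          rw [hit']
          exact pv_filter_map_snd L (fun v => !(v == m))
        have hsz' : copy'.size ≤ fuel := by
          obtain ⟨p, hpL, hp2⟩ := List.mem_map.mp hm
          have hlt : (L.filter (fun p => !(p.2 == m))).length < L.length :=
            List.length_filter_lt_length_iff_exists.mpr ⟨p, hpL, by simp [hp2]⟩
          have : copy'.size = (L.filter (fun p => !(p.2 == m))).length := congrArg List.length hit'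
          have hszL : L.length ≤ fuel + 1 := hsz
          omega
        have hnd' : copy'.keys.Nodup := by
          show (copy'.items.map (fun p => p.1)).Nodup
          rw [hit']
          exact hndL.sublist ((L.filter_sublist).map _)
        have hresm : res.contains m = false := hres m hm
        have hres' : ∀ v ∈ copy'.values, (res.insert m grp).contains v = false := by
          intro v hv
          rw [hval'] at hv
          obtain ⟨hvV, hvm⟩ := List.mem_filter.mp hv
          have hne : v ≠ m := by simpa using hvm
          rw [PySem.Dict.contains_insert]
          simp [hne, hres v hvV]
        have hstep : pvAloop (fuel + 1) copy res = pvAloop fuel copy' (res.insert m grp) := by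
          simp only [pvAloop]
          rw [if_neg h0, hmx]
        rw [hstep, ih copy' (res.insert m grp) hsz' hnd' hres',
            PySem.Dict.items_insert_of_not_contains res grp hresm,
            pv_sorted_rev_cons_max copy.values m hm hmax, hval']
        simp only [List.map_cons, List.append_assoc, List.cons_append, List.nil_append]
        congr 1
        congr 1
        apply List.map_congr_left
        intro v hv
        have hvm : v ≠ m := by
          have := (PySem.List.sorted_perm _ (fun v : Int => v) true).mem_iff.mp hv
          rw [PySem.Set.mem_ofList] at this
          simpa using (List.mem_filter.mp this).2
        rw [hit', List.filter_filter]
        congr 2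
        apply List.filter_congr
        intro p _
        by_cases hpv : p.2 = v <;> simp [hpv, hvm]

-- grouping by the swapped pairs
theorem pv_swap_group (L : List (String × Int)) (v : Int) :
    (List.map (fun x => x.2) (List.filter (fun p => p.1 == v) (L.map Prod.swap)))
      = (L.filter (fun p => p.2 == v)).map (fun p => p.1) := by
  simp [List.filter_map]; rfl

theorem get_clothes_by_time_spec : Claim_equal_get_clothes_by_time := by
  intro td _
  unfold Spec_get_clothes_by_time
  show get_clothes_by_time td = get_clothes_by_time_alt td
  unfold get_clothes_by_time get_clothes_by_time_alt
  set d := PySem.Dict.ofList td with hd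
  have hnd : d.keys.Nodup := PySem.Dict.nodup_keys_ofList td
  have hA := pv_Aloop_spec d.size d PySem.Dict.empty (le_refl _) hnd
    (fun v _ => PySem.Dict.contains_empty v)
  set g := d.items.foldl (fun g p => g.modify p.2 [] (fun l => l ++ [p.1])) PySem.Dict.empty with hg
  have hkeys : g.keys = PySem.Set.ofList d.values := by
    rw [hg, PySem.Dict.keys_foldl_modify_key d.items (fun p => p.2) [] (fun _ p => fun l => l ++ [p.1]),
        PySem.Dict.keys_empty, PySem.Set.update_nil_left]
    rfl
  have hgetD : ∀ v : Int, g.getD v [] = (d.items.filter (fun p => p.2 == v)).map (fun p => p.1) := by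
    intro v
    have hfold : g = (d.items.map Prod.swap).foldl
        (fun g q => g.modify q.1 [] (fun l => l ++ [q.2])) PySem.Dict.empty := by
      rw [hg, List.foldl_map]
      rfl
    rw [hfold, PySem.Dict.getD_foldl_modify_append, PySem.Dict.getD_empty, List.nil_append,
        pv_swap_group]
  rw [hA]
  show PySem.Dict.empty.items ++ _ = List.map (fun v => (v, g.getD v [])) (PySem.List.sorted g.keys (fun v => v) true)
  have hempty : (PySem.Dict.empty : PySem.Dict Int (List String)).items = [] := rfl
  rw [hempty, List.nil_append, hkeys]
  apply List.map_congr_left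
  intro v _
  rw [hgetD v]
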